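-- pv_equiv track=rewrite | github.com/maximerenault/PegSolitaireSolver | solitaireFuncs.py | heur
-- ===== SOURCE A (Python) =====
-- def heur(L):
--     """Returns heuristic value for board L.
--     It is defined as sum(i**2 + j**2) * n - sum(i)**2 - sum(j)**2
--     with i, j the coordinates of marbles and n the number of marbles.
--     It corresponds to the variance of positions.
--
--     Args:
--         L (list(list)): A board
--
--     Returns:
--         int: Value of heuristic
--     """
--     s1 = 0
--     si = 0
--     sj = 0
--     sij2 = 0
--     for i in range(len(L)):
--         for j in range(len(L[0])):
--             if L[i][j] == 1:
--                 s1 += 1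
--                 si += i
--                 sj += j
--                 sij2 += i**2 + j**2
--     return sij2 * s1 - si**2 - sj**2
-- ===== SOURCE B (Python) =====
-- def heur(L):
--     """Variance heuristic computed from marginal histograms: build per-row and
--     per-column counts of marbles first, then reduce them with closed-form sums."""
--     w = len(L[0]) if L else 0
--     row_counts = [row[:w].count(1) for row in L]
--     col_counts = [sum(1 for row in L if row[j] == 1) for j in range(w)]
--     s1 = sum(row_counts)
--     si = sum(i * row_counts[i] for i in range(len(L)))
--     sj = sum(j * col_counts[j] for j in range(w))
--     sij2 = sum(i * i * row_counts[i] for i in range(len(L))) \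
--          + sum(j * j * col_counts[j] for j in range(w))
--     return sij2 * s1 - si * si - sj * sj
-- ===== Notes on version B (the rewrite author's own statement) =====
-- stated objective: alternative
-- what changed: Replaces A's single nested scan with four running accumulators by first building marginal row/column marble histograms and then reducing them with closed-form weighted sums.
import Mathlib
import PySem

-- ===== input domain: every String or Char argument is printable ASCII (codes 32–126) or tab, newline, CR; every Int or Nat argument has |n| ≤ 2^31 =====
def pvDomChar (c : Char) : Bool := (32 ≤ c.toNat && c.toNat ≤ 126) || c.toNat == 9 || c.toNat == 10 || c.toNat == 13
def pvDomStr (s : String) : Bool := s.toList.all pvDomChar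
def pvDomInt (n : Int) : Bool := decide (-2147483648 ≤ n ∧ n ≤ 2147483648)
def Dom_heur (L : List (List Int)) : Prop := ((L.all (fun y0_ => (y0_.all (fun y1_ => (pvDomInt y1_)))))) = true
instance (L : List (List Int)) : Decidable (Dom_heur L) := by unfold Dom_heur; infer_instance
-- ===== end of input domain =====

-- B builds per-row/per-column marble histograms first and reduces them with closed-form
-- sums, instead of A's single four-accumulator nested scan (objective: alternative).


-- ===== PORT A =====
-- nested loop over i in range(len(L)), j in range(len(L[0])) with four accumulators
def heur (L : List (List Int)) : Int :=
  let w : Int := (PySem.List.pyGetD L 0 []).length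
  let s : Int × Int × Int × Int :=
    (PySem.List.pyRange 0 L.length 1).foldl (fun s i =>
      (PySem.List.pyRange 0 w 1).foldl (fun s j =>
        if PySem.List.pyGetD (PySem.List.pyGetD L i []) j 0 = 1 then
          (s.1 + 1, s.2.1 + i, s.2.2.1 + j, s.2.2.2 + (i ^ 2 + j ^ 2))
        else s) s) (0, 0, 0, 0)
  s.2.2.2 * s.1 - s.2.1 ^ 2 - s.2.2.1 ^ 2

-- ===== PORT B =====
-- marginal histograms, then closed-form reductions
def heur_alt (L : List (List Int)) : Int :=
  let w : Int := match L with | [] => 0 | r :: _ => (r.length : Int)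
  let rowCounts : List Int :=
    L.map (fun row => (PySem.List.count (PySem.List.slice row none (some w)) 1 : Int))
  let colCounts : List Int :=
    (PySem.List.pyRange 0 w 1).map (fun j =>
      (L.map (fun row => if PySem.List.pyGetD row j 0 = 1 then (1 : Int) else 0)).sum)
  let s1 := rowCounts.sum
  let si := ((PySem.List.pyRange 0 L.length 1).map
      (fun i => i * PySem.List.pyGetD rowCounts i 0)).sum
  let sj := ((PySem.List.pyRange 0 w 1).map
      (fun j => j * PySem.List.pyGetD colCounts j 0)).sum
  let sij2 := ((PySem.List.pyRange 0 L.length 1).map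
      (fun i => i * i * PySem.List.pyGetD rowCounts i 0)).sum
    + ((PySem.List.pyRange 0 w 1).map
      (fun j => j * j * PySem.List.pyGetD colCounts j 0)).sum
  sij2 * s1 - si * si - sj * sj

-- ===== PRECONDITION & SPEC =====
-- Pre_ excludes exactly the ragged boards on which both Pythons raise IndexError:
-- some row is shorter than the first row (A reads L[i][j] for all j < len(L[0])).
def Pre_heur (L : List (List Int)) : Prop := ∀ r ∈ L, (L.headD []).length ≤ r.length
instance (L : List (List Int)) : Decidable (Pre_heur L) := by unfold Pre_heur; infer_instance

def pvWitness_heur : List (List Int) := [[1, 0, 1], [0, 1, 0]]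

def Spec_heur (L : List (List Int)) (out : Int) : Prop := out = heur_alt L
instance (L : List (List Int)) (out : Int) : Decidable (Spec_heur L out) := by unfold Spec_heur; infer_instance

-- ===== CLAIM (what is proved, stated in full; the proofs are below) =====
def Claim_equal_heur : Prop := ∀ (L : List (List Int)), Dom_heur L → Pre_heur L → Spec_heur L (heur L)

-- ===== LEMMAS AND PROOFS =====

-- generic: a fold that adds four per-element contributions is the four sums
theorem pv_foldl_addv4 (l : List Int) (f1 f2 f3 f4 : Int → Int)
    (s : Int × Int × Int × Int) :
    l.foldl (fun s j => (s.1 + f1 j, s.2.1 + f2 j, s.2.2.1 + f3 j, s.2.2.2 + f4 j)) s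
    = (s.1 + (l.map f1).sum, s.2.1 + (l.map f2).sum,
       s.2.2.1 + (l.map f3).sum, s.2.2.2 + (l.map f4).sum) := by
  induction l generalizing s with
  | nil => simp
  | cons x xs ih => simp [List.foldl_cons, ih]; refine ⟨by ring, by ring, by ring, by ring⟩

-- generic interchange of a double sum
theorem pv_sum_comm (L : List (List Int)) (R : List Int) (h : Int → List Int → Int) :
    (L.map (fun r => (R.map (fun j => h j r)).sum)).sum
    = (R.map (fun j => (L.map (fun r => h j r)).sum)).sum := by
  induction L with
  | nil => simp
  | cons r rest ih =>
      simp only [List.map_cons, List.sum_cons, ih]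
      rw [← List.sum_map_add]

theorem pv_range_map_pyGetD (r : List Int) (wn : Nat) (hw : wn ≤ r.length) :
    (PySem.List.pyRange 0 (wn : Int) 1).map (fun j => PySem.List.pyGetD r j 0)
      = r.take wn := by
  induction wn with
  | zero => simp [PySem.List.pyRange_one_eq_nil]
  | succ k ih =>
      have h1 : (0 : Int) ≤ (k : Int) := by positivity
      rw [show ((k + 1 : Nat) : Int) = (k : Int) + 1 by push_cast; ring,
        PySem.List.pyRange_one_succ_right h1, List.map_append, ih (by omega)]
      rw [List.take_add_one]
      simp only [List.map_cons, List.map_nil]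
      rw [PySem.List.pyGetD_eq_getElem _ _ _ (by exact_mod_cast by omega : (k:Int) < (r.length:Int))]
      simp [List.getElem?_eq_getElem (by omega : k < r.length)]
      exact h1

def pvInd (r : List Int) (j : Int) : Int :=
  if PySem.List.pyGetD r j 0 = 1 then 1 else 0

theorem heurA_closed (L : List (List Int)) :
    heur L =
      (let w : Int := (PySem.List.pyGetD L 0 []).length
       let R := PySem.List.pyRange 0 L.length 1
       let C := PySem.List.pyRange 0 w 1
       let s1 := (R.map (fun i => (C.map (fun j => pvInd (PySem.List.pyGetD L i []) j)).sum)).sum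
       let si := (R.map (fun i => (C.map (fun j => i * pvInd (PySem.List.pyGetD L i []) j)).sum)).sum
       let sj := (R.map (fun i => (C.map (fun j => j * pvInd (PySem.List.pyGetD L i []) j)).sum)).sum
       let s2 := (R.map (fun i => (C.map (fun j => (i ^ 2 + j ^ 2) * pvInd (PySem.List.pyGetD L i []) j)).sum)).sum
       s2 * s1 - si ^ 2 - sj ^ 2) := by
  simp only [heur]
  have hbody : (fun (s : Int × Int × Int × Int) (i : Int) =>
      (PySem.List.pyRange 0 ((PySem.List.pyGetD L 0 []).length : Int) 1).foldl (fun s j =>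
        if PySem.List.pyGetD (PySem.List.pyGetD L i []) j 0 = 1 then
          (s.1 + 1, s.2.1 + i, s.2.2.1 + j, s.2.2.2 + (i ^ 2 + j ^ 2))
        else s) s)
    = (fun s i =>
      (s.1 + ((PySem.List.pyRange 0 ((PySem.List.pyGetD L 0 []).length : Int) 1).map
          (fun j => pvInd (PySem.List.pyGetD L i []) j)).sum,
       s.2.1 + ((PySem.List.pyRange 0 ((PySem.List.pyGetD L 0 []).length : Int) 1).map
          (fun j => i * pvInd (PySem.List.pyGetD L i []) j)).sum,
       s.2.2.1 + ((PySem.List.pyRange 0 ((PySem.List.pyGetD L 0 []).length : Int) 1).map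
          (fun j => j * pvInd (PySem.List.pyGetD L i []) j)).sum,
       s.2.2.2 + ((PySem.List.pyRange 0 ((PySem.List.pyGetD L 0 []).length : Int) 1).map
          (fun j => (i ^ 2 + j ^ 2) * pvInd (PySem.List.pyGetD L i []) j)).sum)) := by
    funext s i
    have hstep : (fun (s : Int × Int × Int × Int) (j : Int) =>
        if PySem.List.pyGetD (PySem.List.pyGetD L i []) j 0 = 1 then
          (s.1 + 1, s.2.1 + i, s.2.2.1 + j, s.2.2.2 + (i ^ 2 + j ^ 2))
        else s)
      = (fun s j => (s.1 + pvInd (PySem.List.pyGetD L i []) j,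
          s.2.1 + i * pvInd (PySem.List.pyGetD L i []) j,
          s.2.2.1 + j * pvInd (PySem.List.pyGetD L i []) j,
          s.2.2.2 + (i ^ 2 + j ^ 2) * pvInd (PySem.List.pyGetD L i []) j)) := by
      funext s j
      unfold pvInd
      split <;> simp
    rw [hstep, pv_foldl_addv4]
  rw [hbody, pv_foldl_addv4]
  simp

theorem pv_R_map {α : Type} (L : List (List Int)) (g : List Int → α) :
    (PySem.List.pyRange 0 (L.length : Int) 1).map (fun i => g (PySem.List.pyGetD L i []))
      = L.map g := by
  conv_rhs => rw [← PySem.List.map_pyGetD_pyRange_zero L []]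
  rw [List.map_map]
  simp [Function.comp]

theorem pv_cnt_row (r : List Int) (wn : Nat) (h : wn ≤ r.length) :
    ((PySem.List.count (PySem.List.slice r none (some (wn : Int))) 1 : Nat) : Int)
      = ((PySem.List.pyRange 0 (wn : Int) 1).map (fun j => pvInd r j)).sum := by
  rw [PySem.List.count_eq, PySem.List.slice_to r (by positivity)]
  have hcomp : (fun j => pvInd r j)
      = (fun x => if x = 1 then (1 : Int) else 0) ∘ (fun j => PySem.List.pyGetD r j 0) := rfl
  rw [hcomp, ← List.map_map, pv_range_map_pyGetD r wn h]
  simp only [show ∀ x : Int, (if x = 1 then (1 : Int) else 0)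
      = (if (x == 1) = true then (1 : Int) else 0) from fun x => by simp]
  simp only [PySem.List.sum_map_ite_one_zero, List.count_eq_countP, Int.toNat_natCast]

theorem pv_pyGetD_map (M : List (List Int)) (g : List Int → Int) (i : Int)
    (h0 : 0 ≤ i) (h1 : i < (M.length : Int)) :
    PySem.List.pyGetD (M.map g) i 0 = g (PySem.List.pyGetD M i []) := by
  rw [PySem.List.pyGetD_eq_getElem _ _ h0 (by simpa using h1),
      PySem.List.pyGetD_eq_getElem _ _ h0 h1]
  simp

theorem heurB_closed (L : List (List Int)) (hPre : Pre_heur L) :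
    heur_alt L =
      (let w : Int := (PySem.List.pyGetD L 0 []).length
       let R := PySem.List.pyRange 0 L.length 1
       let C := PySem.List.pyRange 0 w 1
       let s1 := (R.map (fun i => (C.map (fun j => pvInd (PySem.List.pyGetD L i []) j)).sum)).sum
       let si := (R.map (fun i => (C.map (fun j => i * pvInd (PySem.List.pyGetD L i []) j)).sum)).sum
       let sj := (R.map (fun i => (C.map (fun j => j * pvInd (PySem.List.pyGetD L i []) j)).sum)).sum
       let s2 := (R.map (fun i => (C.map (fun j => (i ^ 2 + j ^ 2) * pvInd (PySem.List.pyGetD L i []) j)).sum)).sum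
       s2 * s1 - si ^ 2 - sj ^ 2) := by
  cases L with
  | nil => decide
  | cons r rest =>
      simp only [heur_alt, pvInd]
      have hPre' : ∀ q ∈ r :: rest, r.length ≤ q.length := by
        simpa [Pre_heur] using hPre
      -- abbreviations (proof-local)
      set M : List (List Int) := r :: rest with hM
      set W : Int := (r.length : Int) with hW
      set C : List Int := PySem.List.pyRange 0 W 1 with hC
      set R : List Int := PySem.List.pyRange 0 (M.length : Int) 1 with hR
      have hM0 : PySem.List.pyGetD M 0 [] = r := by
        rw [hM]; exact PySem.List.pyGetD_zero_cons r rest []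
      simp only [hM0]
      simp only [← hW, ← hC]
      -- B's row counts are the per-row indicator sums
      have hrc : List.map (fun row => ((PySem.List.count (PySem.List.slice row none (some W)) 1 : Nat) : Int)) M
          = M.map (fun q => (C.map (fun j => if PySem.List.pyGetD q j 0 = 1 then (1 : Int) else 0)).sum) := by
        apply List.map_congr_left
        intro q hq
        have := pv_cnt_row q r.length (hPre' q hq)
        simpa [pvInd, ← hW, ← hC] using this
      simp only [hrc]
      have hmemR : ∀ i ∈ R, 0 ≤ i ∧ i < (M.length : Int) := by
        intro i hi; rw [hR] at hi; exact PySem.List.mem_pyRange_one.mp hi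
      have hmemC : ∀ j ∈ C, 0 ≤ j ∧ j < W := by
        intro j hj; rw [hC] at hj; exact PySem.List.mem_pyRange_one.mp hj
      -- B: indexing the row-count table
      have hBsi : List.map (fun i => i * PySem.List.pyGetD (M.map (fun q => (C.map (fun j => if PySem.List.pyGetD q j 0 = 1 then (1 : Int) else 0)).sum)) i 0) R
          = R.map (fun i => i * (C.map (fun j => if PySem.List.pyGetD (PySem.List.pyGetD M i []) j 0 = 1 then (1 : Int) else 0)).sum) := by
        apply List.map_congr_left; intro i hi
        rw [pv_pyGetD_map M _ i (hmemR i hi).1 (hmemR i hi).2]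
      have hBsii : List.map (fun i => i * i * PySem.List.pyGetD (M.map (fun q => (C.map (fun j => if PySem.List.pyGetD q j 0 = 1 then (1 : Int) else 0)).sum)) i 0) R
          = R.map (fun i => i ^ 2 * (C.map (fun j => if PySem.List.pyGetD (PySem.List.pyGetD M i []) j 0 = 1 then (1 : Int) else 0)).sum) := by
        apply List.map_congr_left; intro i hi
        rw [pv_pyGetD_map M _ i (hmemR i hi).1 (hmemR i hi).2]; ring
      -- B: indexing the column-count table, then interchanging the double sums
      have hBsj : List.map (fun j => j * PySem.List.pyGetD (List.map (fun j => (List.map (fun row => if PySem.List.pyGetD row j 0 = 1 then (1 : Int) else 0) M).sum) C) j 0) C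
          = C.map (fun j => (M.map (fun q => if PySem.List.pyGetD q j 0 = 1 then j else 0)).sum) := by
        apply List.map_congr_left; intro j hj
        rw [hC, PySem.List.pyGetD_map_pyRange_of_nonneg _ W j 0 (hmemC j hj).1 (hmemC j hj).2,
          ← List.sum_map_mul_left M (fun row => if PySem.List.pyGetD row j 0 = 1 then (1 : Int) else 0) j]
        congr 1
        apply List.map_congr_left; intro q _
        split <;> simp
      have hBsjj : List.map (fun j => j * j * PySem.List.pyGetD (List.map (fun j => (List.map (fun row => if PySem.List.pyGetD row j 0 = 1 then (1 : Int) else 0) M).sum) C) j 0) C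
          = C.map (fun j => (M.map (fun q => if PySem.List.pyGetD q j 0 = 1 then j ^ 2 else 0)).sum) := by
        apply List.map_congr_left; intro j hj
        rw [hC, PySem.List.pyGetD_map_pyRange_of_nonneg _ W j 0 (hmemC j hj).1 (hmemC j hj).2]
        calc j * j * (List.map (fun row => if PySem.List.pyGetD row j 0 = 1 then (1 : Int) else 0) M).sum
            = j ^ 2 * (List.map (fun row => if PySem.List.pyGetD row j 0 = 1 then (1 : Int) else 0) M).sum := by ring
          _ = (List.map (fun q => j ^ 2 * if PySem.List.pyGetD q j 0 = 1 then (1 : Int) else 0) M).sum :=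
              (List.sum_map_mul_left M _ (j ^ 2)).symm
          _ = (List.map (fun q => if PySem.List.pyGetD q j 0 = 1 then j ^ 2 else 0) M).sum := by
              congr 1
              apply List.map_congr_left; intro q _
              split <;> simp
      have hcommt : (M.map (fun q => (C.map (fun j => if PySem.List.pyGetD q j 0 = 1 then j else 0)).sum)).sum
          = (C.map (fun j => (M.map (fun q => if PySem.List.pyGetD q j 0 = 1 then j else 0)).sum)).sum :=
        pv_sum_comm M C (fun j q => if PySem.List.pyGetD q j 0 = 1 then j else 0)
      have hcommu : (M.map (fun q => (C.map (fun j => if PySem.List.pyGetD q j 0 = 1 then j ^ 2 else 0)).sum)).sum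
          = (C.map (fun j => (M.map (fun q => if PySem.List.pyGetD q j 0 = 1 then j ^ 2 else 0)).sum)).sum :=
        pv_sum_comm M C (fun j q => if PySem.List.pyGetD q j 0 = 1 then j ^ 2 else 0)
      -- A: pull the scalar factors out of the inner sums
      have hAsi : List.map (fun i => (List.map (fun j => i * if PySem.List.pyGetD (PySem.List.pyGetD M i []) j 0 = 1 then (1 : Int) else 0) C).sum) R
          = R.map (fun i => i * (C.map (fun j => if PySem.List.pyGetD (PySem.List.pyGetD M i []) j 0 = 1 then (1 : Int) else 0)).sum) := by
        apply List.map_congr_left; intro i _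
        exact List.sum_map_mul_left C _ i
      have hAsj : List.map (fun i => (List.map (fun j => j * if PySem.List.pyGetD (PySem.List.pyGetD M i []) j 0 = 1 then (1 : Int) else 0) C).sum) R
          = R.map (fun i => (C.map (fun j => if PySem.List.pyGetD (PySem.List.pyGetD M i []) j 0 = 1 then j else 0)).sum) := by
        apply List.map_congr_left; intro i _
        congr 1
        apply List.map_congr_left; intro j _
        rw [mul_ite, mul_one, mul_zero]
      have hAs2 : (List.map (fun i => (List.map (fun j => (i ^ 2 + j ^ 2) * if PySem.List.pyGetD (PySem.List.pyGetD M i []) j 0 = 1 then (1 : Int) else 0) C).sum) R).sum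
          = (R.map (fun i => i ^ 2 * (C.map (fun j => if PySem.List.pyGetD (PySem.List.pyGetD M i []) j 0 = 1 then (1 : Int) else 0)).sum)).sum
            + (R.map (fun i => (C.map (fun j => if PySem.List.pyGetD (PySem.List.pyGetD M i []) j 0 = 1 then j ^ 2 else 0)).sum)).sum := by
        rw [show List.map (fun i => (List.map (fun j => (i ^ 2 + j ^ 2) * if PySem.List.pyGetD (PySem.List.pyGetD M i []) j 0 = 1 then (1 : Int) else 0) C).sum) R
              = R.map (fun i => (C.map (fun j => i ^ 2 * (if PySem.List.pyGetD (PySem.List.pyGetD M i []) j 0 = 1 then (1 : Int) else 0)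
                  + (if PySem.List.pyGetD (PySem.List.pyGetD M i []) j 0 = 1 then j ^ 2 else 0))).sum) from by
            apply List.map_congr_left; intro i _
            congr 1
            apply List.map_congr_left; intro j _
            split <;> ring]
        rw [show R.map (fun i => (C.map (fun j => i ^ 2 * (if PySem.List.pyGetD (PySem.List.pyGetD M i []) j 0 = 1 then (1 : Int) else 0)
                  + (if PySem.List.pyGetD (PySem.List.pyGetD M i []) j 0 = 1 then j ^ 2 else 0))).sum)
              = R.map (fun i => i ^ 2 * (C.map (fun j => if PySem.List.pyGetD (PySem.List.pyGetD M i []) j 0 = 1 then (1 : Int) else 0)).sum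
                  + (C.map (fun j => if PySem.List.pyGetD (PySem.List.pyGetD M i []) j 0 = 1 then j ^ 2 else 0)).sum) from by
            apply List.map_congr_left; intro i _
            rw [PySem.List.sum_map_add_int, List.sum_map_mul_left]]
        exact PySem.List.sum_map_add_int R _ _
      -- index sums over rows become sums over the board
      have hRg : List.map (fun i => (List.map (fun j => if PySem.List.pyGetD (PySem.List.pyGetD M i []) j 0 = 1 then (1 : Int) else 0) C).sum) R
          = M.map (fun q => (C.map (fun j => if PySem.List.pyGetD q j 0 = 1 then (1 : Int) else 0)).sum) := by
        rw [hR]; exact pv_R_map M (fun q => (C.map (fun j => if PySem.List.pyGetD q j 0 = 1 then (1 : Int) else 0)).sum)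
      have hRt : List.map (fun i => (List.map (fun j => if PySem.List.pyGetD (PySem.List.pyGetD M i []) j 0 = 1 then j else 0) C).sum) R
          = M.map (fun q => (C.map (fun j => if PySem.List.pyGetD q j 0 = 1 then j else 0)).sum) := by
        rw [hR]; exact pv_R_map M (fun q => (C.map (fun j => if PySem.List.pyGetD q j 0 = 1 then j else 0)).sum)
      have hRu : List.map (fun i => (List.map (fun j => if PySem.List.pyGetD (PySem.List.pyGetD M i []) j 0 = 1 then j ^ 2 else 0) C).sum) R
          = M.map (fun q => (C.map (fun j => if PySem.List.pyGetD q j 0 = 1 then j ^ 2 else 0)).sum) := by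
        rw [hR]; exact pv_R_map M (fun q => (C.map (fun j => if PySem.List.pyGetD q j 0 = 1 then j ^ 2 else 0)).sum)
      rw [hBsi, hBsii, hBsj, hBsjj, hAsi, hAsj, hAs2, hRg, hRt, ← hcommt, ← hcommu, hRu]
      ring


theorem heur_spec : Claim_equal_heur := by
  intro L _hDom hPre
  unfold Spec_heur
  rw [heurA_closed, heurB_closed L hPre]
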